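-- pv_equiv track=rewrite | github.com/rootikigai/Semicolon | Python/ClassWork/classwork_j19.py | multiply_elems_at_every_third_positions
-- ===== SOURCE A (Python) =====
-- def multiply_elems_at_every_third_positions(list_of_numbers):
--     multiply_numbers = 1
--     counter = 1
--     for i in list_of_numbers:
--         if counter % 3 == 0:
--             multiply_numbers *= i
--         counter += 1
--     return multiply_numbers
-- ===== SOURCE B (Python) =====
-- def multiply_elems_at_every_third_positions(list_of_numbers):
--     result = 1
--     i = 2
--     while i < len(list_of_numbers):
--         result *= list_of_numbers[i]
--         i += 3
--     return result
-- ===== Notes on version B (the rewrite author's own statement) =====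
-- stated objective: simpler
-- what changed: B jumps directly to indices 2, 5, 8, ... and multiplies those elements, instead of walking every element with a counter and a modulo test.
import Mathlib
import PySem

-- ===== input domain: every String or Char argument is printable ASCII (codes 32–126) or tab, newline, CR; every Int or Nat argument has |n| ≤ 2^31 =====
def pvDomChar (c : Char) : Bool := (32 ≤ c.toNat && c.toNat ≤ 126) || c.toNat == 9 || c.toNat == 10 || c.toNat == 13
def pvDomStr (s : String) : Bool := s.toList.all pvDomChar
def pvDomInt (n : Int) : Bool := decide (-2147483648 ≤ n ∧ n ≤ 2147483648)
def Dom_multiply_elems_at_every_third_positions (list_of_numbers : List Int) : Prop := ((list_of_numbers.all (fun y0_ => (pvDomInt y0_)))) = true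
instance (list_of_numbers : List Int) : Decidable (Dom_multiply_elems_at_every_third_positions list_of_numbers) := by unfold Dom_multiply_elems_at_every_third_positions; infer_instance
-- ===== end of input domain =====

-- B visits only indices 2, 5, 8, … directly; A walks every element with a 1-based counter and a modulo test. Objective: simpler (no counter state, no modulo branch).

-- ===== PORT A =====
-- the for-loop of A, state = (multiply_numbers, counter); '%' is exact here: the divisor 3 is positive, so Python's % agrees with Int.emod
def pvALoop (xs : List Int) (mult counter : Int) : Int :=
  match xs with
  | [] => mult
  | i :: rest => pvALoop rest (if counter % 3 == 0 then mult * i else mult) (counter + 1)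

def multiply_elems_at_every_third_positions (list_of_numbers : List Int) : Int :=
  pvALoop list_of_numbers 1 1

-- ===== PORT B =====
-- the while-loop of B: 'while i < len(xs): result *= xs[i]; i += 3'; i starts at 2 and only grows, so it stays a Nat and xs[i] is in range whenever the guard holds
def pvBLoop (xs : List Int) (i : Nat) (result : Int) : Int :=
  if h : i < xs.length then
    pvBLoop xs (i + 3) (result * xs[i])
  else result
termination_by xs.length - i

def multiply_elems_at_every_third_positions_alt (list_of_numbers : List Int) : Int :=
  pvBLoop list_of_numbers 2 1

-- ===== PRECONDITION & SPEC =====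
def Spec_multiply_elems_at_every_third_positions (list_of_numbers : List Int) (out : Int) : Prop := out = multiply_elems_at_every_third_positions_alt list_of_numbers
instance (list_of_numbers : List Int) (out : Int) : Decidable (Spec_multiply_elems_at_every_third_positions list_of_numbers out) := by unfold Spec_multiply_elems_at_every_third_positions; infer_instance

-- ===== CLAIM (what is proved, stated in full; the proofs are below) =====
def Claim_equal_multiply_elems_at_every_third_positions : Prop := ∀ (list_of_numbers : List Int), Dom_multiply_elems_at_every_third_positions list_of_numbers → Spec_multiply_elems_at_every_third_positions list_of_numbers (multiply_elems_at_every_third_positions list_of_numbers)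

-- ===== LEMMAS AND PROOFS =====

theorem pvBLoop_cons (a : Int) (xs : List Int) (i : Nat) (x : Int) :
    pvBLoop (a :: xs) (i + 1) x = pvBLoop xs i x := by
  fun_induction pvBLoop xs i x with
  | case1 i x h ih =>
    rw [pvBLoop]
    simp only [List.length_cons, show i + 1 < xs.length + 1 from by omega, dif_pos]
    simpa using ih
  | case2 i x h =>
    rw [pvBLoop]
    simp only [List.length_cons, show ¬ (i + 1 < xs.length + 1) from by omega, dif_neg,
      not_false_iff]

theorem pvLoops_eq (n : Nat) : ∀ (xs : List Int) (m k : Int), xs.length ≤ n →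
    0 ≤ k → k % 3 = 1 → pvALoop xs m k = pvBLoop xs 2 m := by
  induction n with
  | zero =>
    intro xs m k hlen _ _
    have : xs = [] := List.eq_nil_of_length_eq_zero (by omega)
    subst this
    rw [pvALoop, pvBLoop]; simp
  | succ n ih =>
    intro xs m k hlen hk0 hk1
    match xs with
    | [] => rw [pvALoop, pvBLoop]; simp
    | [a] =>
      rw [pvALoop, pvALoop, pvBLoop]
      simp [show ¬ (k % 3 == 0) = true from by simpa using by omega]
    | [a, b] =>
      rw [pvALoop, pvALoop, pvALoop, pvBLoop]
      simp [show ¬ (k % 3 == 0) = true from by simpa using by omega,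
        show ¬ ((k + 1) % 3 == 0) = true from by simpa using by omega]
    | a :: b :: c :: r =>
      rw [pvALoop, pvALoop, pvALoop]
      simp only [show ((k % 3 == 0) = false) from by simpa using by omega,
        show (((k + 1) % 3 == 0) = false) from by simpa using by omega,
        show (((k + 1 + 1) % 3 == 0) = true) from by simpa using by omega,
        Bool.false_eq_true, if_false, if_true]
      have step : pvALoop r (m * c) (k + 1 + 1 + 1) = pvBLoop r 2 (m * c) := by
        rw [show k + 1 + 1 + 1 = k + 3 from by ring]
        apply ih r (m * c) (k + 3) (by simp at hlen ⊢; omega) (by omega) (by omega)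
      rw [step]
      have h5 : pvBLoop (a :: b :: c :: r) 5 (m * c) = pvBLoop r 2 (m * c) := by
        rw [show (5 : Nat) = 4 + 1 from rfl, pvBLoop_cons,
          show (4 : Nat) = 3 + 1 from rfl, pvBLoop_cons,
          show (3 : Nat) = 2 + 1 from rfl, pvBLoop_cons]
      conv_rhs => rw [pvBLoop]
      simp only [List.length_cons, show 2 < r.length + 1 + 1 + 1 from by omega, dif_pos]
      have h5' : pvBLoop (a :: b :: c :: r) (2 + 3) (m * (a :: b :: c :: r)[2]) = pvBLoop r 2 (m * c) := by
        simpa using h5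
      exact h5'.symm

-- ===== VERDICT (by name: the statement is the Claim_ definition above) =====
theorem multiply_elems_at_every_third_positions_spec : Claim_equal_multiply_elems_at_every_third_positions := by
  intro xs _
  unfold Spec_multiply_elems_at_every_third_positions multiply_elems_at_every_third_positions
    multiply_elems_at_every_third_positions_alt
  exact pvLoops_eq xs.length xs 1 1 le_rfl (by omega) (by omega)
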